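-- pv_equiv track=rewrite | github.com/soumyashr/adaptive-assessment-system | backend/Backirt_engine copy.py | _count_max_consecutive
-- ===== SOURCE A (Python) =====
-- from typing import List, Tuple, Dict, Optional
--
-- def _count_max_consecutive(response_history: List[bool], target_response: bool) -> int:
--     """Count maximum consecutive responses of a specific type"""
--     if not response_history:
--         return 0
--
--     max_consecutive = 0
--     current_consecutive = 0
--
--     for response in response_history:
--         if response == target_response:
--             current_consecutive += 1
--             max_consecutive = max(max_consecutive, current_consecutive)
--         else:
--             current_consecutive = 0
--
--     return max_consecutive
-- ===== SOURCE B (Python) =====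
-- from itertools import groupby
--
-- def _count_max_consecutive(response_history, target_response):
--     """Max length over maximal consecutive runs equal to target_response (0 if none)."""
--     return max((sum(1 for _ in g) for k, g in groupby(response_history)
--                 if k == target_response), default=0)
-- ===== Notes on version B (the rewrite author's own statement) =====
-- stated objective: idiomatic
-- what changed: Replaces the running counter with running max by splitting the list into maximal runs via itertools.groupby and taking the max length over runs equal to the target (default 0).
import Mathlib
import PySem

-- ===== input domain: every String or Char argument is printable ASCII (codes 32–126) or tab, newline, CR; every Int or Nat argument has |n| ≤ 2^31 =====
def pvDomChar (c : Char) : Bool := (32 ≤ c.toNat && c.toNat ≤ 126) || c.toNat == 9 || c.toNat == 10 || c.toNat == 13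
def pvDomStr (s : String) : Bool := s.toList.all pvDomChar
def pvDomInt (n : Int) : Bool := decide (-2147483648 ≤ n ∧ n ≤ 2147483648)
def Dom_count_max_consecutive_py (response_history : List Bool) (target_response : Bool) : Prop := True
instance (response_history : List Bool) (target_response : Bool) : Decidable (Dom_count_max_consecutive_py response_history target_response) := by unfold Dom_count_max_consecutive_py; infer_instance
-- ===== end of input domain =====

-- B computes the same max-consecutive count by splitting the list into maximal
-- runs (groupby) and taking the max length over matching runs, instead of
-- maintaining a running counter with a per-element max update (objective: idiomatic).


-- ===== PORT A =====
-- the for-loop of A: state (max_consecutive, current_consecutive)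
def pvLoopA (t : Bool) : List Bool → Int → Int → Int
  | [], m, _ => m
  | r :: xs, m, c =>
    if r == t then pvLoopA t xs (max m (c + 1)) (c + 1)
    else pvLoopA t xs m 0

def count_max_consecutive_py (response_history : List Bool) (target_response : Bool) : Int :=
  if response_history.isEmpty then 0
  else pvLoopA target_response response_history 0 0

-- ===== PORT B =====
-- groupby: peel off one maximal run at a time; keep its length if its key matches.
def pvRunsMax (t : Bool) : List Bool → Int
  | [] => 0
  | x :: xs =>
    let rest := xs.dropWhile (· == x)
    let m := pvRunsMax t rest
    if x == t then max ((xs.takeWhile (· == x)).length + 1 : Int) m else m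
termination_by l => l.length
decreasing_by
  simp only [List.length_cons]
  exact Nat.lt_succ_of_le (List.length_dropWhile_le _ _)

def count_max_consecutive_py_alt (response_history : List Bool) (target_response : Bool) : Int :=
  pvRunsMax target_response response_history

-- ===== PRECONDITION & SPEC =====
def Spec_count_max_consecutive_py (response_history : List Bool) (target_response : Bool) (out : Int) : Prop := out = count_max_consecutive_py_alt response_history target_response
instance (response_history : List Bool) (target_response : Bool) (out : Int) : Decidable (Spec_count_max_consecutive_py response_history target_response out) := by unfold Spec_count_max_consecutive_py; infer_instance

-- ===== CLAIM (what is proved, stated in full; the proofs are below) =====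
def Claim_equal_count_max_consecutive_py : Prop := ∀ (response_history : List Bool) (target_response : Bool), Dom_count_max_consecutive_py response_history target_response → Spec_count_max_consecutive_py response_history target_response (count_max_consecutive_py response_history target_response)

-- ===== LEMMAS AND PROOFS =====

-- proof-only helper: the "future contribution" of A's loop given current run length c
def pvHAux (t : Bool) : List Bool → Int → Int
  | [], _ => 0
  | r :: xs, c => if r == t then max (c + 1) (pvHAux t xs (c + 1)) else pvHAux t xs 0

theorem pvHAux_nonneg (t : Bool) (l : List Bool) : ∀ c, 0 ≤ pvHAux t l c := by
  induction l with
  | nil => intro c; simp [pvHAux]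
  | cons r xs ih =>
    intro c
    simp only [pvHAux]
    split
    · exact le_trans (ih (c + 1)) (le_max_right _ _)
    · exact ih 0

theorem pvLoopA_eq (t : Bool) (l : List Bool) :
    ∀ m c, 0 ≤ m → pvLoopA t l m c = max m (pvHAux t l c) := by
  induction l with
  | nil => intro m c hm; simp [pvLoopA, pvHAux]; omega
  | cons r xs ih =>
    intro m c hm
    simp only [pvLoopA, pvHAux]
    split
    · rw [ih (max m (c + 1)) (c + 1) (le_trans hm (le_max_left _ _))]
      omega
    · exact ih m 0 hm

theorem pv_takeWhile_nil_dropWhile {p : Bool → Bool} {l : List Bool}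
    (h : l.takeWhile p = []) : l.dropWhile p = l := by
  cases l with
  | nil => rfl
  | cons x xs =>
    by_cases hx : p x
    · simp [hx] at h
    · simp [hx]

-- shifting lemma for pvHAux
theorem pvHAux_shift (t : Bool) (l : List Bool) :
    ∀ c, 0 ≤ c →
      pvHAux t l c =
        if (l.takeWhile (· == t)).length = 0 then pvHAux t l 0
        else max (c + (l.takeWhile (· == t)).length) (pvHAux t (l.dropWhile (· == t)) 0) := by
  induction l with
  | nil => intro c _; simp [pvHAux]
  | cons x xs ih =>
    intro c hc
    by_cases hx : x = t
    · subst hx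
      simp only [pvHAux, List.takeWhile_cons, List.dropWhile_cons, beq_self_eq_true,
        if_true, List.length_cons]
      rw [if_neg (by omega : ¬ ((xs.takeWhile (· == x)).length + 1 = 0))]
      rw [ih (c + 1) (by omega)]
      by_cases hk : (xs.takeWhile (· == x)).length = 0
      · simp only [hk, if_true]
        rw [pv_takeWhile_nil_dropWhile (List.length_eq_zero_iff.mp hk)]
        simp
      · simp only [if_neg hk]
        have hkpos : 0 < ((xs.takeWhile (· == x)).length : Int) := by omega
        have := pvHAux_nonneg x (xs.dropWhile (· == x)) 0
        push_cast
        omega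
    · have hbe : (x == t) = false := by simp [hx]
      simp [pvHAux, hbe]

-- pvRunsMax ignores a leading non-matching run
theorem pvRunsMax_dropWhile (t x : Bool) (hx : x ≠ t) (xs : List Bool) :
    pvRunsMax t (xs.dropWhile (· == x)) = pvRunsMax t xs := by
  cases xs with
  | nil => rfl
  | cons y ys =>
    by_cases hy : y = x
    · subst hy
      have hbe : (y == t) = false := by simp [hx]
      rw [pvRunsMax]
      simp [hbe]
    · simp [hy]

theorem pvHAux_eq_runsMax (t : Bool) :
    ∀ n (l : List Bool), l.length ≤ n → pvHAux t l 0 = pvRunsMax t l := by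
  intro n
  induction n with
  | zero =>
    intro l hl
    have : l = [] := List.length_eq_zero_iff.mp (Nat.le_zero.mp hl)
    subst this; simp [pvHAux, pvRunsMax]
  | succ n ih =>
    intro l hl
    cases l with
    | nil => simp [pvHAux, pvRunsMax]
    | cons x xs =>
      simp only [List.length_cons, Nat.succ_le_succ_iff] at hl
      by_cases hx : x = t
      · subst hx
        rw [pvRunsMax]
        simp only [beq_self_eq_true, if_true, pvHAux]
        norm_num
        rw [pvHAux_shift x xs 1 (by omega)]
        by_cases hk : (xs.takeWhile (· == x)).length = 0
        · simp only [hk, if_true]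
          rw [pv_takeWhile_nil_dropWhile (List.length_eq_zero_iff.mp hk)]
          rw [ih xs hl]
          simp
        · simp only [if_neg hk]
          rw [ih (xs.dropWhile (· == x))
            (le_trans (List.length_dropWhile_le _ _) hl)]
          have := pvHAux_nonneg x (xs.dropWhile (· == x)) 0
          -- both sides: max over (run length + 1) and the rest
          have hkpos : 0 < ((xs.takeWhile (· == x)).length : Int) := by omega
          push_cast
          omega
      · have hbe : (x == t) = false := by simp [hx]
        rw [pvRunsMax]
        simp only [hbe, pvHAux]
        rw [ih xs hl]
        exact (pvRunsMax_dropWhile t x hx xs).symm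

-- ===== VERDICT (by name: the statement is the Claim_ definition above) =====
theorem count_max_consecutive_py_spec : Claim_equal_count_max_consecutive_py := by
  intro l t _
  unfold Spec_count_max_consecutive_py count_max_consecutive_py count_max_consecutive_py_alt
  cases l with
  | nil => simp [pvRunsMax]
  | cons x xs =>
    simp only [List.isEmpty_cons, if_false, Bool.false_eq_true]
    rw [pvLoopA_eq t (x :: xs) 0 0 le_rfl]
    rw [pvHAux_eq_runsMax t (x :: xs).length (x :: xs) le_rfl]
    have : 0 ≤ pvRunsMax t (x :: xs) := by
      rw [← pvHAux_eq_runsMax t (x :: xs).length (x :: xs) le_rfl]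
      exact pvHAux_nonneg t (x :: xs) 0
    omega
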